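-- pv_equiv track=rewrite | github.com/xCiaraG/Kattis | shuffling.py | in_out
-- ===== SOURCE A (Python) =====
-- def merge(a, b):
--    l = []
--    while a and b:
--       l.append(a.pop(0))
--       l.append(b.pop(0))
--    while a:
--       l.append(a.pop(0))
--    return l
--
-- def in_out(cmd, n):
--    l = [i for i in range(1, n + 1)]
--    tmp = True
--    count = 0
--    if n % 2 == 0 or cmd == "in" and n % 2 == 1:
--       i = n // 2
--    else:
--       i = n // 2 + 1
--
--    while tmp or sorted(l) != l:
--       tmp = False
--       a = l[:i]
--       b = l[i:]
--       if cmd == "out":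
--          l = merge(a, b)
--       else:
--          l = merge(b, a)
--       count += 1
--    return count
-- ===== SOURCE B (Python) =====
-- def in_out(cmd, n):
--     if n % 2 == 0 or cmd == "in" and n % 2 == 1:
--         i = n // 2
--     else:
--         i = n // 2 + 1
--     q = list(range(1, n + 1))
--     count = 0
--     while True:
--         a, b = (q[:i], q[i:]) if cmd == "out" else (q[i:], q[:i])
--         q = [x for pair in zip(a, b) for x in pair] + a[len(b):]
--         count += 1
--         if all(q[k] <= q[k + 1] for k in range(len(q) - 1)):
--             return count
-- ===== Notes on version B (the rewrite author's own statement) =====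
-- stated objective: alternative
-- what changed: B generates each shuffle functionally as a zip-interleave of the two slices (A's merge helper destructively pops element 0 of each half) and tests order with a short-circuit adjacent-pair scan instead of A's building and comparing a full sorted() copy every round.
import Mathlib
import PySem

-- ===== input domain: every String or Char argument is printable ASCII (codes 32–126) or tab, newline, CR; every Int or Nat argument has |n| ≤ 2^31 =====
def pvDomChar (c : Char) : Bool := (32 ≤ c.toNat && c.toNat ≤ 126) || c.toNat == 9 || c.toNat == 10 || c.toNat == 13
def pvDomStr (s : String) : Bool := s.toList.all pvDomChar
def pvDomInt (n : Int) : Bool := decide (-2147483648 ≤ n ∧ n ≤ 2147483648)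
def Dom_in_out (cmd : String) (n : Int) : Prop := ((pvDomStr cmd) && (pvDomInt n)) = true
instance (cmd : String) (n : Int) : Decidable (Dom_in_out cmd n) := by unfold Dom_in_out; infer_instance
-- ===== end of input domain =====

-- B generates each shuffle functionally as a zip-interleave of the two slices (A's merge pops
-- element 0 of each half) and tests order by a short-circuit adjacent-pair scan instead of
-- building and comparing a sorted() copy every round; same count on every input.


-- ===== PORT A =====
-- merge(a, b): alternate heads while both nonempty, then the rest of a (b's rest is dropped)
def pvMerge : List Int → List Int → List Int
  | a, [] => a
  | [], _ :: _ => []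
  | x :: a, y :: b => x :: y :: pvMerge a b

-- A's while loop as a do-while (tmp forces the first iteration); the Nat fuel is only a totality
-- guard: both loops receive the same fuel, and n! bounds the rounds every reachable input needs
def pvLoopA (cmd : String) (i : Int) : Nat → List Int → Int → Int
  | 0, _, count => count
  | fuel + 1, l, count =>
      let a := PySem.List.slice l none (some i)
      let b := PySem.List.slice l (some i) none
      let l' := if cmd = "out" then pvMerge a b else pvMerge b a
      if PySem.List.sorted l' (fun x => x) false = l' then count + 1
      else pvLoopA cmd i fuel l' (count + 1)

def in_out (cmd : String) (n : Int) : Int :=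
  pvLoopA cmd
    (if PySem.Int.mod n 2 = 0 ∨ (cmd = "in" ∧ PySem.Int.mod n 2 = 1)
     then PySem.Int.floordiv n 2 else PySem.Int.floordiv n 2 + 1)
    (Nat.factorial n.toNat) (PySem.List.pyRange 1 (n + 1) 1) 0

-- ===== PORT B =====
-- a, b = (q[:i], q[i:]) if cmd == "out" else (q[i:], q[:i]);
-- q = [x for pair in zip(a, b) for x in pair] + a[len(b):]
def pvShuffle (cmd : String) (i : Int) (q : List Int) : List Int :=
  let ab := if cmd = "out"
            then (PySem.List.slice q none (some i), PySem.List.slice q (some i) none)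
            else (PySem.List.slice q (some i) none, PySem.List.slice q none (some i))
  (ab.1.zip ab.2).flatMap (fun xy => [xy.1, xy.2])
    ++ PySem.List.slice ab.1 (some ((ab.2.length : Int))) none

-- B's while True loop; all(q[k] <= q[k+1] for k in range(len(q)-1)); same totality-guard fuel
def pvLoopB (cmd : String) (i : Int) : Nat → List Int → Int → Int
  | 0, _, count => count
  | fuel + 1, q, count =>
      let q' := pvShuffle cmd i q
      if (PySem.List.pyRange 0 (PySem.List.len q' - 1) 1).all
           (fun k => decide (PySem.List.pyGetD q' k 0 ≤ PySem.List.pyGetD q' (k + 1) 0))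
      then count + 1 else pvLoopB cmd i fuel q' (count + 1)

def in_out_alt (cmd : String) (n : Int) : Int :=
  pvLoopB cmd
    (if PySem.Int.mod n 2 = 0 ∨ (cmd = "in" ∧ PySem.Int.mod n 2 = 1)
     then PySem.Int.floordiv n 2 else PySem.Int.floordiv n 2 + 1)
    (Nat.factorial n.toNat) (PySem.List.pyRange 1 (n + 1) 1) 0

-- ===== PRECONDITION & SPEC =====
def Spec_in_out (cmd : String) (n : Int) (out : Int) : Prop := out = in_out_alt cmd n
instance (cmd : String) (n : Int) (out : Int) : Decidable (Spec_in_out cmd n out) := by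
  unfold Spec_in_out; infer_instance

-- ===== CLAIM (what is proved, stated in full; the proofs are below) =====
def Claim_equal_in_out : Prop :=
  ∀ (cmd : String) (n : Int), Dom_in_out cmd n → Spec_in_out cmd n (in_out cmd n)

-- ===== LEMMAS AND PROOFS =====

-- Python's merge(a, b) equals the zip-interleave plus the tail of a, for ALL lengths
-- (when b is longer, zip truncates exactly where merge stops and a[len(b):] is empty)
lemma pvMerge_eq_interleave :
    ∀ b a : List Int,
      pvMerge a b = (a.zip b).flatMap (fun xy => [xy.1, xy.2]) ++ a.drop b.length := by
  intro b
  induction b with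
  | nil => intro a; cases a <;> simp [pvMerge]
  | cons y b ih =>
      intro a
      cases a with
      | nil => simp [pvMerge]
      | cons x a => simp [pvMerge, ih a]

lemma pvShuffle_eq_merge (cmd : String) (i : Int) (q : List Int) :
    pvShuffle cmd i q
      = if cmd = "out"
        then pvMerge (PySem.List.slice q none (some i)) (PySem.List.slice q (some i) none)
        else pvMerge (PySem.List.slice q (some i) none) (PySem.List.slice q none (some i)) := by
  unfold pvShuffle
  by_cases hc : cmd = "out" <;>
    simp only [hc, if_true, if_false] <;>
    rw [PySem.List.slice_from_natCast, ← pvMerge_eq_interleave]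

-- adjacent order extends to all pairs
lemma pv_adj_mono (l : List Int)
    (h : ∀ k : Nat, (hk : k + 1 < l.length) → l[k]'(Nat.lt_of_succ_lt hk) ≤ l[k + 1]'hk) :
    ∀ j (hj : j < l.length) i (hi : i ≤ j), l[i]'(lt_of_le_of_lt hi hj) ≤ l[j]'hj := by
  intro j
  induction j with
  | zero =>
      intro hj i hi
      have : i = 0 := by omega
      subst this; exact le_refl _
  | succ j ih =>
      intro hj i hi
      by_cases hij : i = j + 1
      · subst hij; exact le_refl _
      · exact le_trans (ih (by omega) i (by omega)) (h j hj)

-- B's all(...) test is exactly A's "sorted(l) == l" test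
lemma pv_cond (l : List Int) :
    ((PySem.List.pyRange 0 (PySem.List.len l - 1) 1).all
        (fun k => decide (PySem.List.pyGetD l k 0 ≤ PySem.List.pyGetD l (k + 1) 0)) = true)
      ↔ PySem.List.sorted l (fun x => x) false = l := by
  have hlen : PySem.List.len l = (l.length : Int) := PySem.List.len_eq l
  constructor
  · intro h
    refine PySem.List.sorted_eq_self_of_pairwise _ _ ?_
    have hadj : ∀ k : Nat, (hk : k + 1 < l.length) →
        l[k]'(Nat.lt_of_succ_lt hk) ≤ l[k + 1]'hk := by
      intro k hk
      have hmem : (k : Int) ∈ PySem.List.pyRange 0 (PySem.List.len l - 1) 1 := by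
        rw [PySem.List.mem_pyRange_one, hlen]; exact ⟨by omega, by omega⟩
      have := List.all_eq_true.mp h _ hmem
      rw [decide_eq_true_iff] at this
      rw [PySem.List.pyGetD_eq_getElem l 0 (by omega) (by omega),
          show ((k : Int) + 1) = ((k + 1 : Nat) : Int) by push_cast; ring,
          PySem.List.pyGetD_eq_getElem l 0 (by omega) (by omega)] at this
      simpa using this
    rw [List.pairwise_iff_getElem]
    intro a b ha hb hab
    exact pv_adj_mono l hadj b hb a (by omega)
  · intro h
    have hp : l.Pairwise (fun a b => a ≤ b) := by
      have := PySem.List.sorted_pairwise l (fun x => x)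
      rw [h] at this
      exact this
    rw [List.all_eq_true]
    intro x hx
    rw [PySem.List.mem_pyRange_one, hlen] at hx
    obtain ⟨hx0, hx1⟩ := hx
    rw [decide_eq_true_iff]
    rw [PySem.List.pyGetD_eq_getElem l 0 hx0 (by omega),
        PySem.List.pyGetD_eq_getElem l 0 (by omega) (by omega)]
    have := List.pairwise_iff_getElem.mp hp x.toNat (x + 1).toNat (by omega) (by omega) (by omega)
    exact this

-- lockstep bisimulation: the two loops carry the SAME deck and count round for round
lemma pv_bisim (cmd : String) (i : Int) :
    ∀ (fuel : Nat) (q : List Int) (count : Int),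
      pvLoopA cmd i fuel q count = pvLoopB cmd i fuel q count := by
  intro fuel
  induction fuel with
  | zero => intro q count; rfl
  | succ fuel ih =>
      intro q count
      simp only [pvLoopA, pvLoopB, pvShuffle_eq_merge]
      by_cases hs : PySem.List.sorted
          (if cmd = "out"
           then pvMerge (PySem.List.slice q none (some i)) (PySem.List.slice q (some i) none)
           else pvMerge (PySem.List.slice q (some i) none) (PySem.List.slice q none (some i)))
          (fun x => x) false
        = (if cmd = "out"
           then pvMerge (PySem.List.slice q none (some i)) (PySem.List.slice q (some i) none)
           else pvMerge (PySem.List.slice q (some i) none) (PySem.List.slice q none (some i)))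
      · rw [if_pos hs, if_pos ((pv_cond _).mpr hs)]
      · rw [if_neg hs, if_neg (fun hc => hs ((pv_cond _).mp hc))]
        exact ih _ _

-- ===== VERDICT (by name: the statement is the Claim_ definition above) =====
theorem in_out_spec : Claim_equal_in_out := by
  intro cmd n _
  unfold Spec_in_out in_out in_out_alt
  exact pv_bisim cmd _ _ _ _
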